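-- pv_equiv track=rewrite | github.com/daniel-reich/ubiquitous-fiesta | hQRuQguN4bKyM2gik_16.py | simple_check
-- ===== SOURCE A (Python) =====
-- def simple_check(a, b):
--   count = 0
--   if a < b:
--     while a != 0:
--       if b % a == 0:
--         count += 1
--       a -= 1
--       b -= 1
--   else:
--     while b!= 0:
--       if a % b == 0:
--         count += 1
--       a -= 1
--       b -=1
--   return count
-- ===== SOURCE B (Python) =====
-- def simple_check(a, b):
--     # Counts k in 1..min(a,b) dividing |a-b|, by divisor-pairing up to sqrt(d).
--     m = min(a, b)
--     d = abs(a - b)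
--     if d == 0:
--         return m
--     count = 0
--     i = 1
--     while i * i <= d:
--         if d % i == 0:
--             if i <= m:
--                 count += 1
--             j = d // i
--             if j != i and j <= m:
--                 count += 1
--         i += 1
--     return count
-- ===== Notes on version B (the rewrite author's own statement) =====
-- stated objective: faster
-- what changed: A decrements both numbers in lockstep, testing divisibility at every step up to min(a,b); B computes d=|a-b| once and counts divisors of d up to min(a,b) by paired trial division up to sqrt(d) (special-casing d=0). Pre_ excludes min(a,b)<0, where A's loop never terminates (it diverges, returning nothing).
import Mathlib
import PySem

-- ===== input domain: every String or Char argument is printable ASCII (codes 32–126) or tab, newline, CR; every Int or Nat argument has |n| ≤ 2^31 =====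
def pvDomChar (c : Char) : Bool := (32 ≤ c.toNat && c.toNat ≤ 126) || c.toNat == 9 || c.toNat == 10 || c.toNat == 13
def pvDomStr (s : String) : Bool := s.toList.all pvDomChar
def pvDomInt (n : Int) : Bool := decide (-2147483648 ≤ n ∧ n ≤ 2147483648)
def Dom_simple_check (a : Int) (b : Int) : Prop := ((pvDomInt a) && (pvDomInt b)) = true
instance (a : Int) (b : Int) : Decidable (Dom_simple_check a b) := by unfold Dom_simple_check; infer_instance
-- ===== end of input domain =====

-- B replaces A's O(min(a,b)) decrement loop by divisor-pairing trial division up to sqrt(|a-b|); equal return values proved on Pre_.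


-- ===== PORT A =====
-- A's first while loop ('while a != 0', decrementing a and b). For a < 0 the Python loop
-- never terminates (excluded by Pre_); the port returns the accumulator there to stay total.
def pyLoopLt (a b count : Int) : Int :=
  if 0 < a then
    pyLoopLt (a - 1) (b - 1) (count + if PySem.Int.mod b a = 0 then 1 else 0)
  else count
termination_by a.toNat
decreasing_by omega

-- A's second while loop ('while b != 0'); same totalisation for b < 0 (Python diverges there).
def pyLoopGe (a b count : Int) : Int :=
  if 0 < b then
    pyLoopGe (a - 1) (b - 1) (count + if PySem.Int.mod a b = 0 then 1 else 0)
  else count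
termination_by b.toNat
decreasing_by omega

def simple_check (a : Int) (b : Int) : Int :=
  if a < b then pyLoopLt a b 0 else pyLoopGe a b 0

-- ===== PORT B =====
-- B's trial loop: 'while i * i <= d'.
def altLoop (d m i count : Int) : Int :=
  if i * i ≤ d then
    altLoop d m (i + 1)
      (if PySem.Int.mod d i = 0 then
        (count + (if i ≤ m then 1 else 0))
          + (if PySem.Int.floordiv d i ≠ i ∧ PySem.Int.floordiv d i ≤ m then 1 else 0)
       else count)
  else count
termination_by (d + 1 - i).toNat
decreasing_by
  have hi : i ≤ d := by
    by_cases h0 : 0 < i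
    · nlinarith
    · nlinarith
  omega

def simple_check_alt (a : Int) (b : Int) : Int :=
  let m := min a b
  let d := |a - b|
  if d = 0 then m else altLoop d m 1 0

-- ===== PRECONDITION & SPEC =====
-- Pre_ excludes exactly the inputs with min(a,b) < 0, on which A's decrement loop never
-- terminates (Python diverges; A returns no value there).
def Pre_simple_check (a : Int) (b : Int) : Prop := 0 ≤ a ∧ 0 ≤ b
instance (a : Int) (b : Int) : Decidable (Pre_simple_check a b) := by unfold Pre_simple_check; infer_instance
def pvWitness_simple_check : Int × Int := (6, 18)

def Spec_simple_check (a : Int) (b : Int) (out : Int) : Prop := out = simple_check_alt a b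
instance (a : Int) (b : Int) (out : Int) : Decidable (Spec_simple_check a b out) := by unfold Spec_simple_check; infer_instance

-- ===== CLAIM (what is proved, stated in full; the proofs are below) =====
def Claim_equal_simple_check : Prop := ∀ (a : Int) (b : Int), Dom_simple_check a b → Pre_simple_check a b → Spec_simple_check a b (simple_check a b)

-- ===== LEMMAS AND PROOFS =====

-- The value both programs compute: the number of k in 1..M dividing D.
def divCnt (D M : Nat) : Nat := ((Finset.Icc 1 M).filter (fun k => k ∣ D)).card

theorem divCnt_succ (D n : Nat) :
    divCnt D (n + 1) = divCnt D n + if (n + 1) ∣ D then 1 else 0 := by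
  unfold divCnt
  rw [show Finset.Icc 1 (n+1) = insert (n+1) (Finset.Icc 1 n) from
    Eq.symm (Finset.insert_Icc_right_eq_Icc_add_one (by omega)), Finset.filter_insert]
  split
  · rw [Finset.card_insert_of_notMem (by simp [Finset.mem_Icc])]
  · simp

theorem divCnt_zero_left (M : Nat) : divCnt 0 M = M := by
  unfold divCnt
  simp

theorem dvd_sub_self_iff (m b : Int) : m ∣ b ↔ m ∣ (b - m) := by
  constructor
  · intro h; exact dvd_sub h (dvd_refl m)
  · intro h; have := dvd_add h (dvd_refl m); simpa using this

-- A's loops count the k in 1..n dividing the (constant) difference of the two counters.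
theorem pyLoopLt_eq (n : Nat) (b c : Int) :
    pyLoopLt (n : Int) b c = c + divCnt (b - n).natAbs n := by
  induction n generalizing b c with
  | zero => rw [pyLoopLt]; simp [divCnt]
  | succ n ih =>
    rw [pyLoopLt]
    rw [if_pos (by positivity)]
    have h1 : ((n : Int) + 1) - 1 = (n : Int) := by ring
    push_cast
    rw [h1, ih]
    have h2 : b - 1 - (n : Int) = b - ((n : Int) + 1) := by ring
    rw [h2]
    have h3 : (PySem.Int.mod b ((n:Int)+1) = 0) ↔ ((n+1) ∣ (b - ((n:Int)+1)).natAbs) := by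
      rw [PySem.Int.mod_eq_zero_iff_dvd]
      rw [dvd_sub_self_iff]
      rw [← Int.dvd_natAbs]
      exact_mod_cast Iff.rfl
    rw [divCnt_succ]
    by_cases hd : (n+1) ∣ (b - ((n:Int)+1)).natAbs
    · rw [if_pos (h3.mpr hd), if_pos hd]; push_cast; ring
    · rw [if_neg (fun h => hd (h3.mp h)), if_neg hd]; push_cast; ring

theorem pyLoopGe_eq (n : Nat) (a c : Int) :
    pyLoopGe a (n : Int) c = c + divCnt (a - n).natAbs n := by
  induction n generalizing a c with
  | zero => rw [pyLoopGe]; simp [divCnt]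
  | succ n ih =>
    rw [pyLoopGe]
    rw [if_pos (by positivity)]
    have h1 : ((n : Int) + 1) - 1 = (n : Int) := by ring
    push_cast
    rw [h1, ih]
    have h2 : a - 1 - (n : Int) = a - ((n : Int) + 1) := by ring
    rw [h2]
    have h3 : (PySem.Int.mod a ((n:Int)+1) = 0) ↔ ((n+1) ∣ (a - ((n:Int)+1)).natAbs) := by
      rw [PySem.Int.mod_eq_zero_iff_dvd]
      rw [dvd_sub_self_iff]
      rw [← Int.dvd_natAbs]
      exact_mod_cast Iff.rfl
    rw [divCnt_succ]
    by_cases hd : (n+1) ∣ (a - ((n:Int)+1)).natAbs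
    · rw [if_pos (h3.mpr hd), if_pos hd]; push_cast; ring
    · rw [if_neg (fun h => hd (h3.mp h)), if_neg hd]; push_cast; ring

-- What B's loop adds for trial divisor j (stated over Nat).
def natBody (D M j : Nat) : Nat :=
  (if j ∣ D ∧ j ≤ M then 1 else 0) + (if j ∣ D ∧ D / j ≠ j ∧ D / j ≤ M then 1 else 0)

-- Divisor pairing: summing natBody over 1..sqrt D counts all divisors of D up to M.
theorem pair_count (D M : Nat) (hD : 0 < D) :
    ∑ j ∈ Finset.Icc 1 (Nat.sqrt D), natBody D M j = divCnt D M := by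
  unfold natBody
  set s := Nat.sqrt D with hs
  rw [Finset.sum_add_distrib, Finset.sum_boole, Finset.sum_boole]
  unfold divCnt
  rw [← Finset.filter_card_add_filter_neg_card_eq_card (s := (Finset.Icc 1 M).filter (fun k => k ∣ D)) (p := fun k => k ≤ s)]
  have e1 : ((Finset.Icc 1 M).filter (fun k => k ∣ D)).filter (fun k => k ≤ s)
      = (Finset.Icc 1 s).filter (fun j => j ∣ D ∧ j ≤ M) := by
    ext j
    simp only [Finset.mem_filter, Finset.mem_Icc]
    constructor
    · rintro ⟨⟨⟨h1, h2⟩, h3⟩, h4⟩; exact ⟨⟨h1, h4⟩, h3, h2⟩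
    · rintro ⟨⟨h1, h4⟩, h3, h2⟩; exact ⟨⟨⟨h1, h2⟩, h3⟩, h4⟩
  have e2 : (((Finset.Icc 1 M).filter (fun k => k ∣ D)).filter (fun k => ¬ k ≤ s)).card
      = ((Finset.Icc 1 s).filter (fun j => j ∣ D ∧ D / j ≠ j ∧ D / j ≤ M)).card := by
    apply Finset.card_bij' (i := fun k _ => D / k) (j := fun j _ => D / j)
    · -- each large divisor k ≤ M maps to a small divisor D / k ≤ sqrt D
      intro k hk
      simp only [Finset.mem_filter, Finset.mem_Icc, not_le] at hk
      obtain ⟨⟨⟨hk1, hkM⟩, hkD⟩, hks⟩ := hk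
      have hkpos : 0 < k := hk1
      have hDk1 : 1 ≤ D / k := by
        rw [Nat.le_div_iff_mul_le hkpos]
        simpa using Nat.le_of_dvd hD hkD
      have hDks : D / k ≤ s := by
        have h2 : D < (s + 1) * (s + 1) := by have := Nat.lt_succ_sqrt' D; nlinarith [this]
        have : D / k < s + 1 := by
          rw [Nat.div_lt_iff_lt_mul hkpos]
          calc D < (s + 1) * (s + 1) := h2
            _ ≤ (s + 1) * k := by exact Nat.mul_le_mul_left _ hks
        omega
      have hback : D / (D / k) = k := Nat.div_div_self hkD (by omega)
      simp only [Finset.mem_filter, Finset.mem_Icc]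
      refine ⟨⟨hDk1, hDks⟩, ?_, ?_, ?_⟩
      · exact Nat.div_dvd_of_dvd hkD
      · rw [hback]; omega
      · rw [hback]; exact hkM
    · -- each counted small divisor j maps back to the large divisor D / j > sqrt D
      intro j hj
      simp only [Finset.mem_filter, Finset.mem_Icc] at hj
      obtain ⟨⟨hj1, hjs⟩, hjD, hne, hjM⟩ := hj
      have hjpos : 0 < j := hj1
      have hmul : j * (D / j) = D := Nat.mul_div_cancel' hjD
      have hDj1 : 1 ≤ D / j := by
        rw [Nat.le_div_iff_mul_le hjpos]
        simpa using Nat.le_of_dvd hD hjD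
      have hgt : s < D / j := by
        by_contra hle
        push_neg at hle
        have hss : s * s ≤ D := by have := Nat.sqrt_le' D; nlinarith [this]
        have h1 : D ≤ s * s := by
          calc D = j * (D / j) := hmul.symm
            _ ≤ s * s := Nat.mul_le_mul hjs hle
        have hDss : D = s * s := le_antisymm h1 hss
        have hj_eq : j = s := by
          by_contra hjne
          have hjlt : j < s := lt_of_le_of_ne hjs hjne
          have hlt : j * (D / j) < s * s := by nlinarith
          omega
        have hspos : 0 < s := by
          rcases Nat.eq_zero_or_pos s with h | h
          · rw [h] at hDss; omega
          · exact h
        have hDjs : D / j = j := by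
          rw [hj_eq, hDss]
          exact Nat.mul_div_left s hspos
        exact hne hDjs
      simp only [Finset.mem_filter, Finset.mem_Icc, not_le]
      have hdvd : D / j ∣ D := Nat.div_dvd_of_dvd hjD
      exact ⟨⟨⟨hDj1, hjM⟩, hdvd⟩, hgt⟩
    · intro k hk
      simp only [Finset.mem_filter, Finset.mem_Icc] at hk
      exact Nat.div_div_self hk.1.2 (by omega)
    · intro j hj
      simp only [Finset.mem_filter, Finset.mem_Icc] at hj
      exact Nat.div_div_self hj.2.1 (by omega)
  rw [e1, e2]
  simp

-- Unrolling B's loop from counter i to the end gives the sum of natBody over i..sqrt d.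
theorem altLoop_unroll (d m : Int) (hd : 0 < d) (hm : 0 ≤ m) (k : Nat) :
    ∀ (i c : Int), 1 ≤ i → i.toNat + k = Nat.sqrt d.toNat + 1 →
    altLoop d m i c
      = c + ((∑ j ∈ Finset.Icc i.toNat (Nat.sqrt d.toNat), natBody d.toNat m.toNat j : ℕ) : ℤ) := by
  induction k with
  | zero =>
    intro i c hi hk
    have hstop : ¬ i * i ≤ d := by
      intro hle
      have h1 : (i.toNat : Int) = i := Int.toNat_of_nonneg (by omega)
      have h2 : (d.toNat : Int) = d := Int.toNat_of_nonneg (by omega)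
      have h3 : i.toNat * i.toNat ≤ d.toNat := by
        have : ((i.toNat * i.toNat : ℕ) : ℤ) ≤ ((d.toNat : ℕ) : ℤ) := by push_cast; rw [h1, h2]; exact hle
        exact_mod_cast this
      have := Nat.le_sqrt.mpr h3
      omega
    rw [altLoop, if_neg hstop]
    rw [Finset.Icc_eq_empty (by omega)]
    simp
  | succ k ih =>
    intro i c hi hk
    have hiS : i.toNat ≤ Nat.sqrt d.toNat := by omega
    have h1 : (i.toNat : Int) = i := Int.toNat_of_nonneg (by omega)
    have h2 : (d.toNat : Int) = d := Int.toNat_of_nonneg (by omega)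
    have h3 : (m.toNat : Int) = m := Int.toNat_of_nonneg hm
    have hgo : i * i ≤ d := by
      have h4 : i.toNat * i.toNat ≤ d.toNat := Nat.le_sqrt.mp hiS
      calc i * i = ((i.toNat * i.toNat : ℕ) : ℤ) := by push_cast; rw [h1]
        _ ≤ ((d.toNat : ℕ) : ℤ) := by exact_mod_cast h4
        _ = d := h2
    rw [altLoop, if_pos hgo]
    rw [ih (i + 1) _ (by omega) (by omega)]
    have hsplit : ∑ j ∈ Finset.Icc i.toNat (Nat.sqrt d.toNat), natBody d.toNat m.toNat j
        = natBody d.toNat m.toNat i.toNat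
          + ∑ j ∈ Finset.Icc (i + 1).toNat (Nat.sqrt d.toNat), natBody d.toNat m.toNat j := by
      have he : Finset.Icc i.toNat (Nat.sqrt d.toNat)
          = insert i.toNat (Finset.Icc (i.toNat + 1) (Nat.sqrt d.toNat)) := by
        ext x; simp [Finset.mem_Icc, Finset.mem_insert]; omega
      rw [he, Finset.sum_insert (by simp [Finset.mem_Icc])]
      have : (i + 1).toNat = i.toNat + 1 := by omega
      rw [this]
    rw [hsplit]
    have hdvd : (PySem.Int.mod d i = 0) ↔ i.toNat ∣ d.toNat := by
      rw [PySem.Int.mod_eq_zero_iff_dvd]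
      rw [← h1, ← h2]
      exact Int.natCast_dvd_natCast
    have hfd : PySem.Int.floordiv d i = ((d.toNat / i.toNat : ℕ) : ℤ) := by
      rw [← h1, ← h2, PySem.Int.floordiv_natCast]; simp
    have hq2 : (PySem.Int.floordiv d i ≠ i ∧ PySem.Int.floordiv d i ≤ m)
        ↔ (d.toNat / i.toNat ≠ i.toNat ∧ d.toNat / i.toNat ≤ m.toNat) := by
      rw [hfd, ← h1, ← h3]; omega
    unfold natBody
    by_cases hdv : i.toNat ∣ d.toNat
    · rw [if_pos (hdvd.mpr hdv)]
      have eA : (if i ≤ m then (1:ℤ) else 0)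
          = ((if i.toNat ∣ d.toNat ∧ i.toNat ≤ m.toNat then 1 else 0 : ℕ) : ℤ) := by
        by_cases hq : i ≤ m
        · rw [if_pos hq, if_pos ⟨hdv, by omega⟩]; norm_num
        · rw [if_neg hq, if_neg (by rintro ⟨_, h⟩; omega)]; norm_num
      have eB : (if PySem.Int.floordiv d i ≠ i ∧ PySem.Int.floordiv d i ≤ m then (1:ℤ) else 0)
          = ((if i.toNat ∣ d.toNat ∧ d.toNat / i.toNat ≠ i.toNat ∧ d.toNat / i.toNat ≤ m.toNat then 1 else 0 : ℕ) : ℤ) := by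
        by_cases hq : d.toNat / i.toNat ≠ i.toNat ∧ d.toNat / i.toNat ≤ m.toNat
        · rw [if_pos (hq2.mpr hq), if_pos ⟨hdv, hq⟩]; norm_num
        · rw [if_neg (fun h => hq (hq2.mp h)), if_neg (by tauto)]; norm_num
      rw [eA, eB]; push_cast; ring
    · rw [if_neg (fun h => hdv (hdvd.mp h)), if_neg (by tauto), if_neg (by tauto)]
      push_cast; ring

theorem altLoop_eq (d m : Int) (hd : 0 < d) (hm : 0 ≤ m) :
    altLoop d m 1 0 = divCnt d.toNat m.toNat := by
  rw [altLoop_unroll d m hd hm (Nat.sqrt d.toNat) 1 0 (by omega) (by omega)]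
  rw [show (1 : Int).toNat = 1 from rfl]
  rw [pair_count d.toNat m.toNat (by omega)]
  simp

-- ===== VERDICT (by name: the statement is the Claim_ definition above) =====
theorem simple_check_spec : Claim_equal_simple_check := by
  intro a b _ hpre
  obtain ⟨ha, hb⟩ := hpre
  unfold Spec_simple_check simple_check simple_check_alt
  by_cases hab : a < b
  · rw [if_pos hab]
    have hA : pyLoopLt a b 0 = (divCnt (b - a).natAbs a.toNat : ℤ) := by
      have := pyLoopLt_eq a.toNat b 0
      rw [Int.toNat_of_nonneg ha] at this
      simpa using this
    have habs : |a - b| = b - a := by rw [abs_sub_comm]; exact abs_of_nonneg (by omega)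
    simp only [habs]
    rw [if_neg (by omega)]
    have hmin : min a b = a := min_eq_left (by omega)
    rw [hmin, altLoop_eq (b - a) a (by omega) ha]
    rw [hA, show (b - a).natAbs = (b - a).toNat from by omega]
  · rw [if_neg hab]
    have hA : pyLoopGe a b 0 = (divCnt (a - b).natAbs b.toNat : ℤ) := by
      have := pyLoopGe_eq b.toNat a 0
      rw [Int.toNat_of_nonneg hb] at this
      simpa using this
    have habs : |a - b| = a - b := abs_of_nonneg (by omega)
    simp only [habs]
    have hmin : min a b = b := min_eq_right (by omega)
    rw [hmin]
    by_cases hz : a - b = 0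
    · rw [if_pos hz, hA, hz]
      simp [divCnt_zero_left]
      omega
    · rw [if_neg hz]
      rw [altLoop_eq (a - b) b (by omega) hb]
      rw [hA, show (a - b).natAbs = (a - b).toNat from by omega]
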